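-- pv_equiv track=rewrite | github.com/adrianperezkeilty/Mathematical-Cryptography | prng_bbs.py | BBS_atributes
-- ===== SOURCE A (Python) =====
-- def BBS_atributes(n, seed):
--     (x, bits1, bits2) = (seed, format(seed,'b')[ - 1], format(seed,'b').rjust(2, '0')[ - 2:])
--     (L, period, count) = ([x], 0, 0)
--
--     # Work with first 100 bits of the sequence
--     while count<100 or not period:
--         count = count +  1
--         x = (x**2) % n
--
--         # Least significant bits
--         (bits1, bits2) = (bits1 +  format(x,'b')[ - 1], bits2 +  format(x,'b').rjust(2, '0')[ - 2:])
--         L.append(x)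
--         if L.count(x)>1 and not period:
--             # Period
--             period = (len(L) - 1) - L.index(L[ - 1])
--     return period, bits1, bits2
-- ===== SOURCE B (Python) =====
-- def _race(step, t, h, k):
--     # generic 'while t != h: advance; k += 1' race
--     while t != h:
--         t, h = step(t, h)
--         k += 1
--     return k, t, h
--
-- def BBS_atributes(n, seed):
--     # Floyd tortoise-hare cycle detection: O(mu+lam) time, O(1) memory,
--     # instead of A's stored list with O(k) count/index scans per step.
--     def f(x):
--         return (x * x) % n
--     # phase 1: meeting point m (t at x_m, h at x_2m)
--     m, t, h = _race(lambda t, h: (f(t), f(f(h))), f(seed), f(f(seed)), 1)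
--     # phase 2: mu = start of the cycle
--     mu, t, h = _race(lambda t, h: (f(t), f(h)), seed, h, 0)
--     # phase 3: lam = cycle length
--     lam, _, _ = _race(lambda t, h: (t, f(h)), t, f(t), 1)
--     # regenerate the first max(100, mu+lam)+1 values, collecting the LSB strings
--     T = max(100, mu + lam)
--     x = seed
--     b = format(x, 'b')
--     bits1 = [b[-1]]
--     bits2 = [b.rjust(2, '0')[-2:]]
--     for _ in range(T):
--         x = f(x)
--         b = format(x, 'b')
--         bits1.append(b[-1])
--         bits2.append(b.rjust(2, '0')[-2:])
--     return lam, ''.join(bits1), ''.join(bits2)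
-- ===== Notes on version B (the rewrite author's own statement) =====
-- stated objective: faster
-- what changed: Replaces A's stored-list repeat detection (L.count/L.index scans every iteration) by Floyd's tortoise-hare cycle detection, which finds the cycle start mu and length lam in O(mu+lam) steps with O(1) memory, then regenerates the first max(100, mu+lam)+1 values once to collect the bit strings.
import Mathlib
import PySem

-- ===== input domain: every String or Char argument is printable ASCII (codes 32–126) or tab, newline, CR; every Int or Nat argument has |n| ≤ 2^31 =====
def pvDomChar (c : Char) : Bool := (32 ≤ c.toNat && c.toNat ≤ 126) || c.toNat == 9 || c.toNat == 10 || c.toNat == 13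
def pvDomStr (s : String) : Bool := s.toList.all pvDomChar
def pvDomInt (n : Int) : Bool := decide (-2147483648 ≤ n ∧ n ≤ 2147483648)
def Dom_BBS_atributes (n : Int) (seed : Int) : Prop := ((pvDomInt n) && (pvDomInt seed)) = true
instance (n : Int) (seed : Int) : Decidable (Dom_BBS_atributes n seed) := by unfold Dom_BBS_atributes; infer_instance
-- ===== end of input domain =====

-- B replaces A's stored list with its O(k) count/index scans per iteration by Floyd's
-- tortoise-hare cycle detection (cycle start mu and length lam in O(1) memory), then
-- regenerates the first max(100, mu+lam)+1 values once to collect the bit strings.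

-- shared bit-string helpers (both Pythons compute these very expressions identically):
-- format(x,'b')[-1]  — toBinChars is never empty, so the [-1] index never raises
def bbsLsb1 (x : Int) : List Char := [PySem.List.pyGetD (PySem.Int.toBinChars x) (-1) '0']
-- format(x,'b').rjust(2,'0')[-2:] ; rjust ported by hand (exact): pad '0' on the left to length 2
def bbsLsb2 (x : Int) : List Char :=
  let s := PySem.Int.toBinChars x
  let r := List.replicate (2 - s.length) '0' ++ s
  PySem.List.slice r (some (-2)) none
-- shared fuel: within Dom (|n| ≤ 2^31) the ρ-shape numbers mu+lam are ≤ 4·|n|+4 < 2^40,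
-- so no loop of either port ever exhausts this fuel there
def bbsFuel : Nat := 1099511627776

-- ===== PORT A =====
def BBS_loopA (n : Int) : Nat → Int → List Char → List Char → List Int → Int → Int → Int × String × String
  | 0, _, b1, b2, _, period, _ => (period, String.ofList b1, String.ofList b2)
  | fuel + 1, x, b1, b2, L, period, count =>
    if count < 100 ∨ period = 0 then
      let count' := count + 1
      let x' := PySem.Int.mod (x ^ 2) n
      let b1' := b1 ++ bbsLsb1 x'
      let b2' := b2 ++ bbsLsb2 x'
      let L' := L ++ [x']
      let period' :=
        if PySem.List.count L' x' > 1 ∧ period = 0 then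
          ((L'.length : Int) - 1) - (((PySem.List.index? L' x').getD 0 : Nat) : Int)
        else period
      BBS_loopA n fuel x' b1' b2' L' period' count'
    else (period, String.ofList b1, String.ofList b2)

def BBS_atributes (n : Int) (seed : Int) : Int × String × String :=
  BBS_loopA n bbsFuel seed (bbsLsb1 seed) (bbsLsb2 seed) [seed] 0 0

-- ===== PORT B =====
-- _race(step, t, h, k): while t != h: (t, h) = step(t, h); k += 1
def bbsRace (step : Int × Int → Int × Int) : Nat → Int × Int → Nat → Nat × Int × Int
  | 0, st, k => (k, st)
  | fuel + 1, st, k =>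
    if st.1 ≠ st.2 then bbsRace step fuel (step st) (k + 1) else (k, st)

-- f(x) = (x*x) % n, and the three lambda step functions passed to _race
def bbsF (n : Int) (x : Int) : Int := PySem.Int.mod (x * x) n
def bbsStep1 (n : Int) (th : Int × Int) : Int × Int := (bbsF n th.1, bbsF n (bbsF n th.2))
def bbsStep2 (n : Int) (th : Int × Int) : Int × Int := (bbsF n th.1, bbsF n th.2)
def bbsStep3 (n : Int) (th : Int × Int) : Int × Int := (th.1, bbsF n th.2)
-- the body of B's regeneration for-loop
def bbsGen (n : Int) (st : Int × List (List Char) × List (List Char)) :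
    Int × List (List Char) × List (List Char) :=
  let x' := bbsF n st.1
  (x', st.2.1 ++ [bbsLsb1 x'], st.2.2 ++ [bbsLsb2 x'])

def BBS_atributes_alt (n : Int) (seed : Int) : Int × String × String :=
  -- phase 1: Floyd meeting point
  let r1 := bbsRace (bbsStep1 n) bbsFuel (bbsF n seed, bbsF n (bbsF n seed)) 1
  -- phase 2: mu = start of the cycle
  let r2 := bbsRace (bbsStep2 n) bbsFuel (seed, r1.2.2) 0
  let t := r2.2.1
  -- phase 3: lam = cycle length
  let r3 := bbsRace (bbsStep3 n) bbsFuel (t, bbsF n t) 1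
  let T := max 100 (r2.1 + r3.1)
  -- regenerate the first T+1 values, collecting the LSB chunks
  let fin := (List.range T).foldl (fun st _ => bbsGen n st) (seed, [bbsLsb1 seed], [bbsLsb2 seed])
  ((r3.1 : Int), String.ofList fin.2.1.flatten, String.ofList fin.2.2.flatten)

-- ===== PRECONDITION & SPEC =====
-- Pre_ excludes exactly n = 0, where Python A raises ZeroDivisionError on 'x**2 % n'
def Pre_BBS_atributes (n : Int) (seed : Int) : Prop := n ≠ 0
instance (n : Int) (seed : Int) : Decidable (Pre_BBS_atributes n seed) := by unfold Pre_BBS_atributes; infer_instance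
def pvWitness_BBS_atributes : Int × Int := (7, 3)

def Spec_BBS_atributes (n : Int) (seed : Int) (out : Int × String × String) : Prop := out = BBS_atributes_alt n seed
instance (n : Int) (seed : Int) (out : Int × String × String) : Decidable (Spec_BBS_atributes n seed out) := by unfold Spec_BBS_atributes; infer_instance

-- ===== CLAIM (what is proved, stated in full; the proofs are below) =====
def Claim_equal_BBS_atributes : Prop := ∀ (n : Int) (seed : Int), Dom_BBS_atributes n seed → Pre_BBS_atributes n seed → Spec_BBS_atributes n seed (BBS_atributes n seed)

-- ===== LEMMAS AND PROOFS =====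

-- the iterated squaring sequence x_0 = seed, x_{k+1} = x_k^2 mod n
def bbsSeq (n seed : Int) : Nat → Int
  | 0 => seed
  | k + 1 => bbsF n (bbsSeq n seed k)

-- A's list L after `c` iterations, and the two bit strings after `c` iterations
def bbsPre (n seed : Int) (c : Nat) : List Int := (List.range (c + 1)).map (bbsSeq n seed)
def bbsB1 (n seed : Int) (c : Nat) : List Char := (List.range (c + 1)).flatMap (fun i => bbsLsb1 (bbsSeq n seed i))
def bbsB2 (n seed : Int) (c : Nat) : List Char := (List.range (c + 1)).flatMap (fun i => bbsLsb2 (bbsSeq n seed i))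

-- all values after step 0 lie in the finite interval (-|n|, |n|)
lemma bbs_seq_mem (n seed : Int) (hn : n ≠ 0) (k : Nat) :
    bbsSeq n seed (k + 1) ∈ Finset.Ioo (-|n|) |n| := by
  have hseq : bbsSeq n seed (k + 1) = PySem.Int.mod (bbsSeq n seed k * bbsSeq n seed k) n := rfl
  simp only [Finset.mem_Ioo, hseq]
  rcases lt_or_gt_of_ne hn with hneg | hpos
  · have hb := PySem.Int.mod_neg_bounds (a := bbsSeq n seed k * bbsSeq n seed k) hneg
    have : |n| = -n := abs_of_neg hneg
    omega
  · have h1 := PySem.Int.mod_nonneg (a := bbsSeq n seed k * bbsSeq n seed k) hpos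
    have h2 := PySem.Int.mod_lt (a := bbsSeq n seed k * bbsSeq n seed k) hpos
    have : |n| = n := abs_of_pos hpos
    omega

-- forward propagation: a repeat with gap p at m propagates to every k ≥ m
lemma bbs_prop (n seed : Int) (m p : Nat) (h : bbsSeq n seed (m + p) = bbsSeq n seed m) :
    ∀ k, m ≤ k → bbsSeq n seed (k + p) = bbsSeq n seed k := by
  intro k hk
  induction k, hk using Nat.le_induction with
  | base => exact h
  | succ k hk ih =>
    have harr : k + 1 + p = (k + p) + 1 := by omega
    rw [harr]
    show bbsF n (bbsSeq n seed (k + p)) = _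
    rw [ih]
    rfl

-- multiples of the cycle length
lemma bbs_mult (n seed : Int) (mu lam : Nat) (h2 : bbsSeq n seed (mu + lam) = bbsSeq n seed mu) :
    ∀ c k, mu ≤ k → bbsSeq n seed (k + c * lam) = bbsSeq n seed k := by
  intro c
  induction c with
  | zero => intro k _; simp
  | succ c ih =>
    intro k hk
    have h1 : bbsSeq n seed (k + lam) = bbsSeq n seed k := bbs_prop n seed mu lam h2 k hk
    have harr : k + (c + 1) * lam = (k + lam) + c * lam := by ring
    rw [harr, ih (k + lam) (by omega), h1]

-- any repeat gap at or beyond mu is a multiple of lam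
lemma bbs_div (n seed : Int) (mu lam : Nat) (hlam : 0 < lam)
    (h2 : bbsSeq n seed (mu + lam) = bbsSeq n seed mu)
    (h6 : ∀ p, 0 < p → p < lam → bbsSeq n seed (mu + p) ≠ bbsSeq n seed mu) :
    ∀ m p, mu ≤ m → 0 < p → bbsSeq n seed (m + p) = bbsSeq n seed m → lam ∣ p := by
  intro m p hm hp h
  by_cases hd0 : p % lam = 0
  · exact Nat.dvd_of_mod_eq_zero hd0
  · exfalso
    have hd : p % lam < lam := Nat.mod_lt _ hlam
    have hE : ∀ k, m ≤ k → bbsSeq n seed (k + p) = bbsSeq n seed k := bbs_prop n seed m p h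
    have hM : m ≤ mu + m * lam := by nlinarith [Nat.one_le_iff_ne_zero.mpr (Nat.pos_iff_ne_zero.mp hlam)]
    have e1 : bbsSeq n seed (mu + m * lam) = bbsSeq n seed mu := bbs_mult n seed mu lam h2 m mu le_rfl
    have e2 : bbsSeq n seed (mu + m * lam + p) = bbsSeq n seed (mu + m * lam) := hE _ hM
    have hdm := Nat.div_add_mod p lam
    have harr : mu + m * lam + p = (mu + p % lam) + (m + p / lam) * lam := by
      have : (m + p / lam) * lam = m * lam + (p / lam) * lam := by ring
      have : lam * (p / lam) = (p / lam) * lam := by ring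
      nlinarith [Nat.div_add_mod p lam]
    have e3 : bbsSeq n seed (mu + m * lam + p) = bbsSeq n seed (mu + p % lam) := by
      rw [harr]
      exact bbs_mult n seed mu lam h2 (m + p / lam) (mu + p % lam) (by omega)
    exact h6 (p % lam) (by omega) hd (by rw [← e3, e2, e1])

-- injectivity on the rho tail: the first mu+lam values are pairwise distinct
lemma bbs_inj (n seed : Int) (mu lam : Nat) (hlam : 0 < lam)
    (h2 : bbsSeq n seed (mu + lam) = bbsSeq n seed mu)
    (h4 : ∀ m p, 0 < p → bbsSeq n seed (m + p) = bbsSeq n seed m → mu ≤ m)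
    (h6 : ∀ p, 0 < p → p < lam → bbsSeq n seed (mu + p) ≠ bbsSeq n seed mu) :
    ∀ i j, i < j → j < mu + lam → bbsSeq n seed i ≠ bbsSeq n seed j := by
  intro i j hij hj h
  have hsub : i + (j - i) = j := by omega
  have hrep : bbsSeq n seed (i + (j - i)) = bbsSeq n seed i := by rw [hsub]; exact h.symm
  have hmu : mu ≤ i := h4 i (j - i) (by omega) hrep
  have hdvd : lam ∣ (j - i) := bbs_div n seed mu lam hlam h2 h6 i (j - i) hmu (by omega) hrep
  have : lam ≤ j - i := Nat.le_of_dvd (by omega) hdvd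
  omega

-- existence of the rho shape, with a size bound from the pigeonhole principle
lemma bbs_rho (n seed : Int) (hn : n ≠ 0) :
    ∃ mu lam : Nat, 0 < lam ∧ mu ≤ 2 * |n|.toNat ∧ lam ≤ 2 * |n|.toNat ∧
      bbsSeq n seed (mu + lam) = bbsSeq n seed mu ∧
      (∀ m p, 0 < p → bbsSeq n seed (m + p) = bbsSeq n seed m → mu ≤ m) ∧
      (∀ p, 0 < p → p < lam → bbsSeq n seed (mu + p) ≠ bbsSeq n seed mu) := by
  classical
  set N := 2 * |n|.toNat with hN
  have hn1 : (1 : Int) ≤ |n| := by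
    rcases lt_or_gt_of_ne hn with h | h
    · rw [abs_of_neg h]; omega
    · rw [abs_of_pos h]; omega
  have hNpos : 0 < N := by omega
  -- pigeonhole: among bbsSeq 1 .. bbsSeq N two values coincide
  have hcard : (Finset.Ioo (-|n|) |n|).card < (Finset.range N).card := by
    rw [Int.card_Ioo, Finset.card_range]
    omega
  have hmaps : ∀ k ∈ Finset.range N, bbsSeq n seed (k + 1) ∈ Finset.Ioo (-|n|) |n| := by
    intro k _; exact bbs_seq_mem n seed hn k
  obtain ⟨x, hx, y, hy, hxy, hfxy⟩ :=
    Finset.exists_ne_map_eq_of_card_lt_of_maps_to hcard hmaps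
  simp only [Finset.mem_range] at hx hy
  -- wlog x < y
  obtain ⟨m0, p0, hm0, hp0, hp0N, hrep0⟩ :
      ∃ m0 p0 : Nat, m0 ≤ N ∧ 0 < p0 ∧ p0 ≤ N ∧ bbsSeq n seed (m0 + p0) = bbsSeq n seed m0 := by
    rcases Nat.lt_or_ge x y with hlt | hge
    · exact ⟨x + 1, y - x, by omega, by omega, by omega, by rw [show x + 1 + (y - x) = y + 1 by omega]; exact hfxy.symm⟩
    · have hlt : y < x := by omega
      exact ⟨y + 1, x - y, by omega, by omega, by omega, by rw [show y + 1 + (x - y) = x + 1 by omega]; exact hfxy⟩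
  have hex : ∃ m, ∃ p, 0 < p ∧ bbsSeq n seed (m + p) = bbsSeq n seed m := ⟨m0, p0, hp0, hrep0⟩
  set mu := Nat.find hex with hmu_def
  obtain ⟨p1, hp1, hrep1⟩ := Nat.find_spec hex
  have hex2 : ∃ p, 0 < p ∧ bbsSeq n seed (mu + p) = bbsSeq n seed mu := ⟨p1, hp1, hrep1⟩
  set lam := Nat.find hex2 with hlam_def
  obtain ⟨hlam_pos, h2⟩ := Nat.find_spec hex2
  have h4 : ∀ m p, 0 < p → bbsSeq n seed (m + p) = bbsSeq n seed m → mu ≤ m := by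
    intro m p hp h; exact Nat.find_min' hex ⟨p, hp, h⟩
  have h6 : ∀ p, 0 < p → p < lam → bbsSeq n seed (mu + p) ≠ bbsSeq n seed mu := by
    intro p hp hplam h
    exact Nat.find_min hex2 hplam ⟨hp, h⟩
  refine ⟨mu, lam, hlam_pos, ?_, ?_, h2, h4, h6⟩
  · exact le_trans (h4 m0 p0 hp0 hrep0) hm0
  · have hmu0 : mu ≤ m0 := h4 m0 p0 hp0 hrep0
    have hdvd : lam ∣ p0 := bbs_div n seed mu lam hlam_pos h2 h6 m0 p0 hmu0 hp0 hrep0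
    exact le_trans (Nat.le_of_dvd hp0 hdvd) hp0N

-- the race loop reaches the first meeting index of its trajectory
lemma bbsRace_eq (step : Int × Int → Int × Int) (g : Nat → Int × Int)
    (hstep : ∀ k, step (g k) = g (k + 1)) (N : Nat) (hN : (g N).1 = (g N).2) :
    ∀ fuel k0, (∀ k, k0 ≤ k → k < N → (g k).1 ≠ (g k).2) → k0 ≤ N → N - k0 ≤ fuel →
      bbsRace step fuel (g k0) k0 = (N, g N) := by
  intro fuel
  induction fuel with
  | zero =>
    intro k0 _ hk0 hfuel
    have : k0 = N := by omega
    subst this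
    rfl
  | succ fuel ih =>
    intro k0 hlt hk0 hfuel
    rw [bbsRace]
    by_cases hne : (g k0).1 ≠ (g k0).2
    · have hk0N : k0 ≠ N := fun h => hne (h ▸ hN)
      rw [if_pos hne, hstep k0]
      exact ih (k0 + 1) (fun k hk hkN => hlt k (by omega) hkN) (by omega) (by omega)
    · push Not at hne
      have : k0 = N := by
        by_contra hk
        exact hlt k0 le_rfl (by omega) hne
      subst this
      rw [if_neg (by simpa using hne)]

-- first index of f k in (range N).map f when no earlier index has the same value
lemma bbs_index_map_range (f : Nat → Int) (N k : Nat) (hk : k < N)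
    (hfirst : ∀ j, j < k → f j ≠ f k) :
    PySem.List.index? ((List.range N).map f) (f k) = some k := by
  induction N with
  | zero => omega
  | succ N ih =>
    rw [List.range_succ, List.map_append]
    rcases Nat.lt_or_ge k N with hkN | hkN
    · have hmem : f k ∈ (List.range N).map f := by
        simp only [List.mem_map, List.mem_range]
        exact ⟨k, hkN, rfl⟩
      rw [PySem.List.index?_append_of_mem _ hmem]
      exact ih hkN
    · have hkeq : k = N := by omega
      subst hkeq
      have hnot : f k ∉ (List.range k).map f := by
        simp only [List.mem_map, List.mem_range]
        rintro ⟨j, hj, hfj⟩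
        exact hfirst j hj hfj
      simp only [List.map_cons, List.map_nil]
      rw [PySem.List.index?_append_singleton_self _ _ hnot]
      simp

lemma bbsB1_succ (n seed : Int) (c : Nat) :
    bbsB1 n seed (c + 1) = bbsB1 n seed c ++ bbsLsb1 (bbsSeq n seed (c + 1)) := by
  simp [bbsB1, List.range_succ]
lemma bbsB2_succ (n seed : Int) (c : Nat) :
    bbsB2 n seed (c + 1) = bbsB2 n seed c ++ bbsLsb2 (bbsSeq n seed (c + 1)) := by
  simp [bbsB2, List.range_succ]
lemma bbsPre_succ (n seed : Int) (c : Nat) :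
    bbsPre n seed (c + 1) = bbsPre n seed c ++ [bbsSeq n seed (c + 1)] := by
  simp [bbsPre, List.range_succ]

-- characterization of A's loop against the rho shape
lemma bbs_loopA_eq (n seed : Int) (mu lam : Nat) (hlam : 0 < lam)
    (h2 : bbsSeq n seed (mu + lam) = bbsSeq n seed mu)
    (h4 : ∀ m p, 0 < p → bbsSeq n seed (m + p) = bbsSeq n seed m → mu ≤ m)
    (h6 : ∀ p, 0 < p → p < lam → bbsSeq n seed (mu + p) ≠ bbsSeq n seed mu) :
    ∀ fuel c, c ≤ max 100 (mu + lam) → max 100 (mu + lam) - c ≤ fuel →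
      BBS_loopA n fuel (bbsSeq n seed c) (bbsB1 n seed c) (bbsB2 n seed c) (bbsPre n seed c)
        (if mu + lam ≤ c then (lam : Int) else 0) (c : Int)
      = ((lam : Int), String.ofList (bbsB1 n seed (max 100 (mu + lam))),
          String.ofList (bbsB2 n seed (max 100 (mu + lam)))) := by
  intro fuel
  induction fuel with
  | zero =>
    intro c hc hfuel
    have hcT : c = max 100 (mu + lam) := by omega
    subst hcT
    rw [if_pos (le_max_right 100 (mu + lam))]
    rfl
  | succ fuel ih =>
    intro c hc hfuel
    by_cases hcT : c = max 100 (mu + lam)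
    · subst hcT
      rw [if_pos (le_max_right 100 (mu + lam)), BBS_loopA]
      rw [if_neg (by push_cast; omega)]
    · have hclt : c < max 100 (mu + lam) := by omega
      rw [BBS_loopA]
      have hcond : ((c : Int) < 100 ∨ (if mu + lam ≤ c then (lam : Int) else 0) = 0) := by
        by_cases hml : mu + lam ≤ c
        · left; have : c < 100 := by omega
          exact_mod_cast this
        · right; rw [if_neg hml]
      rw [if_pos hcond]
      simp only []
      have hx' : PySem.Int.mod (bbsSeq n seed c ^ 2) n = bbsSeq n seed (c + 1) := by
        rw [pow_two]; rfl
      rw [hx']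
      -- the new period value
      have hper : (if PySem.List.count (bbsPre n seed c ++ [bbsSeq n seed (c + 1)]) (bbsSeq n seed (c + 1)) > 1 ∧
              (if mu + lam ≤ c then (lam : Int) else 0) = 0 then
            (((bbsPre n seed c ++ [bbsSeq n seed (c + 1)]).length : Int) - 1) -
              (((PySem.List.index? (bbsPre n seed c ++ [bbsSeq n seed (c + 1)]) (bbsSeq n seed (c + 1))).getD 0 : Nat) : Int)
          else (if mu + lam ≤ c then (lam : Int) else 0))
          = (if mu + lam ≤ c + 1 then (lam : Int) else 0) := by
        rcases Nat.lt_trichotomy (c + 1) (mu + lam) with hlt | heq | hgt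
        · -- before the first repeat: the new value is fresh
          have hnm : bbsSeq n seed (c + 1) ∉ bbsPre n seed c := by
            simp only [bbsPre, List.mem_map, List.mem_range]
            rintro ⟨i, hi, hif⟩
            exact bbs_inj n seed mu lam hlam h2 h4 h6 i (c + 1) (by omega) hlt hif
          have hcnt : PySem.List.count (bbsPre n seed c ++ [bbsSeq n seed (c + 1)]) (bbsSeq n seed (c + 1)) = 1 := by
            rw [PySem.List.count_eq, List.count_append, List.count_eq_zero.mpr hnm]
            simp
          rw [if_neg (by rw [hcnt]; exact fun h => absurd h.1 (by omega)),
            if_neg (show ¬ mu + lam ≤ c by omega), if_neg (show ¬ mu + lam ≤ c + 1 by omega)]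
        · -- the first repeat: seq (mu+lam) = seq mu, first index mu
          have hmuc : mu ≤ c := by omega
          have hval : bbsSeq n seed (c + 1) = bbsSeq n seed mu := by rw [show c + 1 = mu + lam from heq]; exact h2
          have hmem : bbsSeq n seed (c + 1) ∈ bbsPre n seed c := by
            rw [hval]
            simp only [bbsPre, List.mem_map, List.mem_range]
            exact ⟨mu, by omega, rfl⟩
          have hcnt : 1 < PySem.List.count (bbsPre n seed c ++ [bbsSeq n seed (c + 1)]) (bbsSeq n seed (c + 1)) := by
            rw [PySem.List.count_eq, List.count_append]
            have h1 : 0 < List.count (bbsSeq n seed (c + 1)) (bbsPre n seed c) := List.count_pos_iff.mpr hmem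
            have h2c : List.count (bbsSeq n seed (c + 1)) [bbsSeq n seed (c + 1)] = 1 := by simp
            omega
          have hidx : PySem.List.index? (bbsPre n seed c ++ [bbsSeq n seed (c + 1)]) (bbsSeq n seed (c + 1)) = some mu := by
            rw [← bbsPre_succ, hval]
            show PySem.List.index? ((List.range (c + 1 + 1)).map (bbsSeq n seed)) (bbsSeq n seed mu) = some mu
            exact bbs_index_map_range (bbsSeq n seed) (c + 1 + 1) mu (by omega)
              (fun j hj => bbs_inj n seed mu lam hlam h2 h4 h6 j mu hj (by omega))
          rw [if_pos ⟨hcnt, by rw [if_neg (by omega)]⟩, hidx, if_pos (by omega)]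
          simp only [List.length_append, List.length_cons, List.length_nil, bbsPre, List.length_map, List.length_range, Option.getD_some]
          push_cast
          omega
        · -- after the first repeat: period is already lam ≠ 0
          rw [if_pos (show mu + lam ≤ c by omega), if_pos (show mu + lam ≤ c + 1 by omega), if_neg]
          rintro ⟨-, hz⟩
          omega
      rw [hper, ← bbsB1_succ, ← bbsB2_succ, ← bbsPre_succ,
        show ((c : Int) + 1) = ((c + 1 : Nat) : Int) by push_cast; ring]
      exact ih (c + 1) (by omega) (by omega)

-- characterization of B's regeneration fold
lemma bbs_foldB_eq (n seed : Int) (T : Nat) :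
    (List.range T).foldl (fun st _ => bbsGen n st) (seed, [bbsLsb1 seed], [bbsLsb2 seed])
    = (bbsSeq n seed T, (List.range (T + 1)).map (fun i => bbsLsb1 (bbsSeq n seed i)),
        (List.range (T + 1)).map (fun i => bbsLsb2 (bbsSeq n seed i))) := by
  induction T with
  | zero => simp [bbsSeq]
  | succ T ih =>
    rw [List.range_succ, List.foldl_append, ih]
    simp only [List.foldl_cons, List.foldl_nil, List.range_succ, List.map_append]
    rfl

-- ===== VERDICT (by name: the statement is the Claim_ definition above) =====
theorem BBS_atributes_spec : Claim_equal_BBS_atributes := by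
  intro n seed hdom hpre
  unfold Spec_BBS_atributes
  have hn : n ≠ 0 := hpre
  have habs : |n| ≤ 2147483648 := by
    unfold Dom_BBS_atributes pvDomInt at hdom
    simp only [Bool.and_eq_true, decide_eq_true_eq] at hdom
    rcases abs_cases n with ⟨h, _⟩ | ⟨h, _⟩ <;> omega
  have hnn : (0 : Int) ≤ |n| := abs_nonneg n
  have hdn : |n|.toNat ≤ 2147483648 := by omega
  obtain ⟨mu, lam, hlam, hmuB, hlamB, h2, h4, h6⟩ := bbs_rho n seed hn
  have hmuB' : mu ≤ 4294967296 := by omega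
  have hlamB' : lam ≤ 4294967296 := by omega
  -- ===== A's loop =====
  have hA : BBS_atributes n seed
      = ((lam : Int), String.ofList (bbsB1 n seed (max 100 (mu + lam))),
          String.ofList (bbsB2 n seed (max 100 (mu + lam)))) := by
    have h0 := bbs_loopA_eq n seed mu lam hlam h2 h4 h6 bbsFuel 0 (by omega)
      (by unfold bbsFuel; omega)
    rw [if_neg (by omega)] at h0
    have e1 : bbsSeq n seed 0 = seed := rfl
    have e2 : bbsB1 n seed 0 = bbsLsb1 seed := by simp [bbsB1, List.range_one, e1]
    have e3 : bbsB2 n seed 0 = bbsLsb2 seed := by simp [bbsB2, List.range_one, e1]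
    have e4 : bbsPre n seed 0 = [seed] := by simp [bbsPre, List.range_one, e1]
    rw [e1, e2, e3, e4, Nat.cast_zero] at h0
    exact h0
  rw [hA]
  -- ===== B's Floyd phases =====
  have hfseq : ∀ k, bbsF n (bbsSeq n seed k) = bbsSeq n seed (k + 1) := fun _ => rfl
  -- phase 1: the first meeting index N1 of the tortoise and the hare
  have hwit : 0 < lam * (mu / lam + 1) ∧
      bbsSeq n seed (lam * (mu / lam + 1)) = bbsSeq n seed (2 * (lam * (mu / lam + 1))) := by
    refine ⟨by positivity, ?_⟩
    have hdm := Nat.div_add_mod mu lam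
    have hml := Nat.mod_lt mu hlam
    have hmuk : mu ≤ lam * (mu / lam + 1) := by
      have hexp : lam * (mu / lam + 1) = lam * (mu / lam) + lam := by ring
      omega
    have h := bbs_mult n seed mu lam h2 (mu / lam + 1) (lam * (mu / lam + 1)) hmuk
    rw [show lam * (mu / lam + 1) + (mu / lam + 1) * lam = 2 * (lam * (mu / lam + 1)) by ring] at h
    exact h.symm
  have hkstar : ∃ k, 0 < k ∧ bbsSeq n seed k = bbsSeq n seed (2 * k) := ⟨_, hwit⟩
  have hKbound : lam * (mu / lam + 1) ≤ mu + lam := by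
    calc lam * (mu / lam + 1) = mu / lam * lam + lam := by ring
      _ ≤ mu + lam := Nat.add_le_add_right (Nat.div_mul_le_self mu lam) lam
  set N1 := Nat.find hkstar with hN1def
  have hN1pos : 0 < N1 := (Nat.find_spec hkstar).1
  have hN1meet : bbsSeq n seed N1 = bbsSeq n seed (2 * N1) := (Nat.find_spec hkstar).2
  have hN1min : ∀ k, 0 < k → k < N1 → bbsSeq n seed k ≠ bbsSeq n seed (2 * k) := by
    intro k hk hkN h
    exact Nat.find_min hkstar hkN ⟨hk, h⟩
  have hN1le : N1 ≤ lam * (mu / lam + 1) := Nat.find_min' hkstar hwit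
  clear_value N1
  have hN1B : N1 ≤ mu + lam := le_trans hN1le hKbound
  have hmuN1 : mu ≤ N1 := by
    apply h4 N1 N1 hN1pos
    rw [show N1 + N1 = 2 * N1 by ring]
    exact hN1meet.symm
  have hdvdN1 : lam ∣ N1 := by
    apply bbs_div n seed mu lam hlam h2 h6 N1 N1 hmuN1 hN1pos
    rw [show N1 + N1 = 2 * N1 by ring]
    exact hN1meet.symm
  have hr1 : bbsRace (bbsStep1 n) bbsFuel (bbsF n seed, bbsF n (bbsF n seed)) 1
      = (N1, (bbsSeq n seed N1, bbsSeq n seed (2 * N1))) := by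
    have := bbsRace_eq (bbsStep1 n) (fun k => (bbsSeq n seed k, bbsSeq n seed (2 * k)))
      (fun k => by
        show (bbsF n (bbsSeq n seed k), bbsF n (bbsF n (bbsSeq n seed (2 * k)))) = _
        rw [hfseq, hfseq, hfseq, show 2 * k + 1 + 1 = 2 * (k + 1) by ring])
      N1 hN1meet bbsFuel 1 (fun k hk hkN => hN1min k (by omega) hkN) (by omega)
      (by unfold bbsFuel; omega)
    simpa using this
  -- phase 2: meets first at mu
  have hseqN1 : bbsSeq n seed (2 * N1) = bbsSeq n seed N1 := hN1meet.symm
  have hmeet2 : bbsSeq n seed mu = bbsSeq n seed (N1 + mu) := by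
    obtain ⟨c, hc⟩ := hdvdN1
    rw [show N1 + mu = mu + c * lam from by rw [hc]; ring]
    exact (bbs_mult n seed mu lam h2 c mu le_rfl).symm
  have hlt2 : ∀ i, i < mu → bbsSeq n seed i ≠ bbsSeq n seed (N1 + i) := by
    intro i hi h
    have := h4 i N1 hN1pos (by rw [Nat.add_comm]; exact h.symm)
    omega
  have hr2 : bbsRace (bbsStep2 n) bbsFuel (seed, bbsSeq n seed (2 * N1)) 0
      = (mu, (bbsSeq n seed mu, bbsSeq n seed (N1 + mu))) := by
    have := bbsRace_eq (bbsStep2 n) (fun i => (bbsSeq n seed i, bbsSeq n seed (N1 + i)))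
      (fun i => by
        show (bbsF n (bbsSeq n seed i), bbsF n (bbsSeq n seed (N1 + i))) = _
        rw [hfseq, hfseq]
        rfl)
      mu hmeet2 bbsFuel 0 (fun i _ hiN => hlt2 i hiN) (Nat.zero_le _)
      (by unfold bbsFuel; omega)
    simpa [hseqN1] using this
  -- phase 3: cycle length lam
  have hmeet3 : bbsSeq n seed mu = bbsSeq n seed (mu + lam) := h2.symm
  have hlt3 : ∀ p, 0 < p → p < lam → bbsSeq n seed mu ≠ bbsSeq n seed (mu + p) := by
    intro p hp hplam h
    exact h6 p hp hplam h.symm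
  have hr3 : bbsRace (bbsStep3 n) bbsFuel (bbsSeq n seed mu, bbsF n (bbsSeq n seed mu)) 1
      = (lam, (bbsSeq n seed mu, bbsSeq n seed (mu + lam))) := by
    have := bbsRace_eq (bbsStep3 n) (fun p => (bbsSeq n seed mu, bbsSeq n seed (mu + p)))
      (fun p => by
        show (bbsSeq n seed mu, bbsF n (bbsSeq n seed (mu + p))) = _
        rw [hfseq]
        rfl)
      lam hmeet3 bbsFuel 1 (fun p hp hplam => hlt3 p (by omega) hplam) (by omega)
      (by unfold bbsFuel; omega)
    simpa [hfseq] using this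
  -- assemble B
  simp only [BBS_atributes_alt, hr1, hr2, hr3, bbs_foldB_eq]
  simp [bbsB1, bbsB2, List.flatMap_def]
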